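-- pv_equiv track=rewrite | github.com/jhwetstone/advent-of-code-2019 | 4/day_4.py | meetsCriteriaTwo
-- ===== SOURCE A (Python) =====
-- def meetsCriteriaTwo(num):
--     num_str = str(num)
--     prev_digit = int(num_str[0])
--     chain_length = 1
--     chain_of_two = False
--     for idx in range(1, len(num_str)):
--         digit = int(num_str[idx])
--         if digit > prev_digit:
--             if chain_length == 2:
--                 chain_of_two = True
--             chain_length = 1
--         if digit < prev_digit:
--             return False
--         if digit == prev_digit:
--             chain_length += 1
--         prev_digit = digit
--     if chain_length == 2:
--         chain_of_two = True
--     return chain_of_two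
-- ===== SOURCE B (Python) =====
-- from itertools import groupby
--
-- def meetsCriteriaTwo(num):
--     digits = [int(c) for c in str(num)]
--     if not all(a <= b for a, b in zip(digits, digits[1:])):
--         return False
--     return any(sum(1 for _ in g) == 2 for _, g in groupby(digits))
-- ===== Notes on version B (the rewrite author's own statement) =====
-- stated objective: idiomatic
-- what changed: A's single fused loop with a chain-length accumulator is split into two independent passes: a pairwise monotonicity check over zipped neighbours and an itertools.groupby run-length pass testing for a run of exactly 2.
import Mathlib
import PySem

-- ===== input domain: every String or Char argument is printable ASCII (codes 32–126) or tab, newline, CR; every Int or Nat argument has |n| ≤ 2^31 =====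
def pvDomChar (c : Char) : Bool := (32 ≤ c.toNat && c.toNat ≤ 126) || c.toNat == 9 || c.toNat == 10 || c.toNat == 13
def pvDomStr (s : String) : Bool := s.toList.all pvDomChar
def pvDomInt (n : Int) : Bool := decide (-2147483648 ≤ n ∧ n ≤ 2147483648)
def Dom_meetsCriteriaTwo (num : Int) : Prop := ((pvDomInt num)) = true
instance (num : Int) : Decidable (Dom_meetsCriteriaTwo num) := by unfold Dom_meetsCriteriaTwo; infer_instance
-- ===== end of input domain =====

-- B splits A's fused accumulator loop into two independent passes (pairwise monotonicity + groupby run lengths); return values agree on all num ≥ 0 (both raise ValueError on negatives).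

-- int(single-char string); `.getD 0` is unreachable under Pre_ (num ≥ 0 ⇒ every char is a digit, so ofStr? = some)
def pvCharInt (c : Char) : Int := (PySem.Int.ofStr? (String.mk [c])).getD 0

-- ===== PORT A =====
-- the for-loop of A: state (prev_digit, chain_length, chain_of_two), converting each char with int() as it goes
def pvALoop (prev chain : Int) (cot : Bool) : List Char → Bool
  | [] => if chain == 2 then true else cot
  | c :: cs =>
    let digit := pvCharInt c
    let p := if digit > prev then (if chain == 2 then ((1 : Int), true) else (1, cot)) else (chain, cot)
    if digit < prev then false
    else
      let chain' := if digit == prev then p.1 + 1 else p.1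
      pvALoop digit chain' p.2 cs

def meetsCriteriaTwo (num : Int) : Bool :=
  match (PySem.Int.toStr num).toList with
  | [] => false  -- unreachable: str(num) is never empty
  | c :: cs => pvALoop (pvCharInt c) 1 false cs

-- ===== PORT B =====
-- all(a <= b for a, b in zip(digits, digits[1:]))
def pvPairsOk (digits : List Int) : Bool := (digits.zip digits.tail).all (fun p => decide (p.1 ≤ p.2))

-- run lengths of groupby(digits) given current group value `cur` of length `len`
def pvRuns (cur len : Int) : List Int → List Int
  | [] => [len]
  | d :: ds => if d == cur then pvRuns cur (len + 1) ds else len :: pvRuns d 1 ds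

def meetsCriteriaTwo_alt (num : Int) : Bool :=
  let digits := ((PySem.Int.toStr num).toList).map pvCharInt
  if !(pvPairsOk digits) then false
  else
    match digits with
    | [] => false          -- groupby of the empty sequence yields no groups
    | d :: ds => (pvRuns d 1 ds).any (fun x => x == 2)

-- ===== PRECONDITION & SPEC =====
-- Pre_ excludes negative num: str(num) then starts with '-' and int('-') raises ValueError in both A and B.
def Pre_meetsCriteriaTwo (num : Int) : Prop := 0 ≤ num
instance (num : Int) : Decidable (Pre_meetsCriteriaTwo num) := by unfold Pre_meetsCriteriaTwo; infer_instance
def pvWitness_meetsCriteriaTwo : Int := 122345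

def Spec_meetsCriteriaTwo (num : Int) (out : Bool) : Prop := out = meetsCriteriaTwo_alt num
instance (num : Int) (out : Bool) : Decidable (Spec_meetsCriteriaTwo num out) := by unfold Spec_meetsCriteriaTwo; infer_instance

-- ===== CLAIM (what is proved, stated in full; the proofs are below) =====
def Claim_equal_meetsCriteriaTwo : Prop := ∀ (num : Int), Dom_meetsCriteriaTwo num → Pre_meetsCriteriaTwo num → Spec_meetsCriteriaTwo num (meetsCriteriaTwo num)

-- ===== LEMMAS AND PROOFS =====

-- the fused loop equals the two-pass decomposition, for any starting state
theorem pvKey (cs : List Char) : ∀ (prev chain : Int) (cot : Bool),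
    pvALoop prev chain cot cs =
      (pvPairsOk (prev :: cs.map pvCharInt) &&
        (cot || (pvRuns prev chain (cs.map pvCharInt)).any (fun x => x == 2))) := by
  induction cs with
  | nil =>
    intro prev chain cot
    simp [pvALoop, pvPairsOk, pvRuns, List.any]
    by_cases h : chain = 2 <;> simp [h] <;> cases cot <;> simp
  | cons c cs ih =>
    intro prev chain cot
    have hd := lt_trichotomy (pvCharInt c) prev
    rcases hd with h | h | h
    · -- digit < prev : A returns false, pairsOk fails
      simp [pvALoop, pvPairsOk, h, not_le.mpr h]
    · -- digit == prev : chain grows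
      have hgt : ¬ pvCharInt c > prev := by omega
      have hlt : ¬ pvCharInt c < prev := by omega
      simp only [pvALoop, pvPairsOk, List.map_cons]
      rw [if_neg hgt, if_neg hlt, if_pos (beq_iff_eq.mpr h)]
      rw [ih]
      have : pvRuns prev chain (pvCharInt c :: cs.map pvCharInt)
          = pvRuns prev (chain + 1) (cs.map pvCharInt) := by
        simp [pvRuns, beq_iff_eq.mpr h]
      rw [this, h]
      simp [pvPairsOk]
    · -- digit > prev : chain resets, cot may latch
      have hlt : ¬ pvCharInt c < prev := by omega
      have hne : (pvCharInt c == prev) = false := by simp; omega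
      have hruns : ∀ ch : Int, pvRuns prev ch (pvCharInt c :: cs.map pvCharInt)
          = ch :: pvRuns (pvCharInt c) 1 (cs.map pvCharInt) := by
        intro ch; simp [pvRuns, hne]
      simp only [pvALoop, List.map_cons]
      rw [if_pos h, if_neg hlt]
      simp only [hne, Bool.false_eq_true, if_false]
      by_cases h2 : chain = 2
      · rw [if_pos (by simp [h2])]
        rw [ih]
        simp [pvPairsOk, hruns, le_of_lt h, h2]
      · rw [if_neg (by simp [h2])]
        rw [ih]
        simp [pvPairsOk, hruns, le_of_lt h]
        have : (chain == 2) = false := by simp [h2]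
        rw [this, Bool.false_or]

-- ===== VERDICT (by name: the statement is the Claim_ definition above) =====
theorem meetsCriteriaTwo_spec : Claim_equal_meetsCriteriaTwo := by
  intro num _ _
  unfold Spec_meetsCriteriaTwo meetsCriteriaTwo meetsCriteriaTwo_alt
  cases h : (PySem.Int.toStr num).toList with
  | nil => simp [h, pvPairsOk]
  | cons c cs =>
    simp only [h, List.map_cons]
    rw [pvKey]
    simp only [List.map_cons, pvPairsOk, Bool.not_eq_true']
    cases hp : ((pvCharInt c :: cs.map pvCharInt).zip (pvCharInt c :: cs.map pvCharInt).tail).all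
        (fun p => decide (p.1 ≤ p.2)) <;> simp [hp]
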